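-- pv_equiv track=rewrite | github.com/ahmadardani/forso | forso.py | transform_tab2
-- ===== SOURCE A (Python) =====
-- def is_marker(line: str) -> bool:
--     s = line.strip()
--     if not s:
--         return False
--     if len(s) <= 4 and ' ' not in s:
--         return True
--     return False
--
-- def transform_tab2(text: str) -> str:
--     lines = text.splitlines()
--     out_lines, i, n = [], 0, len(lines)
--     while i < n:
--         line = lines[i]
--         if is_marker(line):
--             j = i + 1
--             while j < n and lines[j].strip() == "":
--                 j += 1
--             if j < n and not is_marker(lines[j]):
--                 marker = line.strip().rstrip('. )')
--                 desc = lines[j].strip()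
--                 out_lines.append(f"{marker} {desc}")
--                 i = j + 1
--                 continue
--             else:
--                 out_lines.append(line.strip())
--                 i += 1
--                 continue
--         else:
--             if line.strip() == "":
--                 if out_lines and out_lines[-1] != "":
--                     out_lines.append("")
--             else:
--                 out_lines.append(line.rstrip())
--             i += 1
--     while out_lines and out_lines[0] == "":
--         out_lines.pop(0)
--     while out_lines and out_lines[-1] == "":
--         out_lines.pop()
--     return "\n".join(out_lines)
-- ===== SOURCE B (Python) =====
-- def is_marker(line: str) -> bool:
--     s = line.strip()
--     return bool(s) and len(s) <= 4 and ' ' not in s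
--
-- def transform_tab2(text: str) -> str:
--     # Pass 1: tokenize — merge each marker with its next real line when that
--     # line is a non-marker; whitespace-only lines become "" tokens.
--     stack = text.splitlines()[::-1]
--     tokens = []
--     while stack:
--         line = stack.pop()
--         if line.strip() == "":
--             tokens.append("")
--         elif is_marker(line):
--             skipped = []
--             while stack and stack[-1].strip() == "":
--                 skipped.append(stack.pop())
--             if stack and not is_marker(stack[-1]):
--                 tokens.append(line.strip().rstrip('. )') + " " + stack.pop().strip())
--             else:
--                 stack.extend(reversed(skipped))
--                 tokens.append(line.strip())
--         else:
--             tokens.append(line.rstrip())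
--     # Pass 2: collapse blank runs to one blank, dropping leading/trailing blanks.
--     out = []
--     pending_blank = False
--     for t in tokens:
--         if t == "":
--             pending_blank = True
--         else:
--             if pending_blank and out:
--                 out.append("")
--             out.append(t)
--             pending_blank = False
--     return "\n".join(out)
-- ===== Notes on version B (the rewrite author's own statement) =====
-- stated objective: alternative
-- what changed: A's single index-jumping while-loop (which merges markers, collapses blanks against the growing output, and finally pops leading/trailing blanks) is re-decomposed into two passes: a tokenizer that only does marker/description merging (emitting "" for whitespace-only lines), followed by a normalizer that collapses and trims blank runs with a pending-blank flag, never emitting a trailing blank.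
import Mathlib
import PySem

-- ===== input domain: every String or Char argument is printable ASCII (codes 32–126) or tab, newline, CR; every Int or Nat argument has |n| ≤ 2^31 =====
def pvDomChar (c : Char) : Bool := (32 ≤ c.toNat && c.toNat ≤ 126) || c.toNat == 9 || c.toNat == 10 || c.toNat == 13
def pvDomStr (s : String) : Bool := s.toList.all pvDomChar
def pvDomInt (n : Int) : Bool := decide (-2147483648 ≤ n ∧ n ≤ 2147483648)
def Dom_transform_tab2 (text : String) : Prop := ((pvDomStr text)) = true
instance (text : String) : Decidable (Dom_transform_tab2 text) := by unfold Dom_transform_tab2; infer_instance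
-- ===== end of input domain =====

-- B re-decomposes A's single index-jumping loop into two passes (tokenize, then
-- normalize blanks with a pending flag); objective: alternative decomposition, same cost.

-- shared helper: Python is_marker (identical in Source A and Source B)
def blankB (l : String) : Bool := PySem.Str.strip l == ""

def isMarkerP (line : String) : Bool :=
  let s := PySem.Str.strip line
  if s = "" then false
  else if PySem.Str.len s ≤ 4 ∧ ¬ (PySem.Str.isIn " " s = true) then true
  else false

-- hand port of Python str.rstrip('. )'): drop trailing chars from {'.', ' ', ')'} (exact)
def rstripPunct (cs : List Char) : List Char :=
  (cs.reverse.dropWhile (fun c => c == '.' || c == ' ' || c == ')')).reverse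

-- f"{line.strip().rstrip('. )')} {desc.strip()}" built on List Char (exact concatenation)
def mergeP (m d : String) : String :=
  String.ofList (rstripPunct (PySem.Str.strip m).toList ++ ' ' :: (PySem.Str.strip d).toList)

-- ===== PORT A =====
-- inner while: j advances past whitespace-only lines (lines[j] via getD: 0 ≤ j < n always)
def aInner (lines : List String) (n j : Nat) : Nat :=
  if h : j < n then
    if blankB (lines.getD j "") then aInner lines n (j + 1) else j
  else j
termination_by n - j

theorem aInner_ge (lines : List String) (n j : Nat) : j ≤ aInner lines n j := by
  rw [aInner]
  split
  · split
    · exact le_trans (Nat.le_succ j) (aInner_ge lines n (j + 1))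
    · exact le_refl j
  · exact le_refl j
termination_by n - j

-- main while-loop of A, state (i, out_lines)
def aLoop (lines : List String) (n i : Nat) (out : List String) : List String :=
  if h : i < n then
    let line := lines.getD i ""
    if isMarkerP line then
      let j := aInner lines n (i + 1)
      if hj : j < n ∧ ¬ isMarkerP (lines.getD j "") then
        aLoop lines n (j + 1) (out ++ [mergeP line (lines.getD j "")])
      else
        aLoop lines n (i + 1) (out ++ [PySem.Str.strip line])
    else if blankB line then
      aLoop lines n (i + 1)
        (if out ≠ [] ∧ out.getLast? ≠ some "" then out ++ [""] else out)
    else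
      aLoop lines n (i + 1) (out ++ [PySem.Str.rstrip line])
  else out
termination_by n - i
decreasing_by
  · have := aInner_ge lines n (i + 1); omega
  · omega
  · omega
  · omega

-- while out_lines and out_lines[0] == "": pop(0)
def dropLeadA : List String → List String
  | [] => []
  | x :: r => if x = "" then dropLeadA r else x :: r

-- while out_lines and out_lines[-1] == "": pop()
def dropTrailA (l : List String) : List String :=
  if h : l.getLast? = some "" then dropTrailA l.dropLast else l
termination_by l.length
decreasing_by
  have hne : l ≠ [] := by intro he; subst he; simp at h
  have h1 : l.dropLast.length = l.length - 1 := List.length_dropLast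
  have := List.length_pos_iff.mpr hne
  omega

def transform_tab2 (text : String) : String :=
  PySem.Str.join "\n"
    (dropTrailA (dropLeadA
      (aLoop (PySem.Str.splitlines text) (PySem.Str.splitlines text).length 0 [])))

-- ===== PORT B =====
-- pass 1: tokenize (Source B's stack loop; the stack's top-to-bottom content is this list)
def tokenizeB : List String → List String
  | [] => []
  | l :: rest =>
    if blankB l then "" :: tokenizeB rest
    else if isMarkerP l then
      match hm : rest.dropWhile blankB with
      | d :: rest' =>
        if ¬ isMarkerP d then mergeP l d :: tokenizeB rest'
        else PySem.Str.strip l :: tokenizeB rest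
      | [] => PySem.Str.strip l :: tokenizeB rest
    else PySem.Str.rstrip l :: tokenizeB rest
termination_by l => l.length
decreasing_by
  · simp
  · have h1 : (rest.dropWhile blankB).length ≤ rest.length := rest.length_dropWhile_le blankB
    rw [hm] at h1; simp at h1 ⊢; omega
  · simp
  · simp
  · simp

-- pass 2: normalize (out, pending_blank) fold
def bStep (st : List String × Bool) (t : String) : List String × Bool :=
  if t = "" then (st.1, true)
  else ((if st.2 ∧ st.1 ≠ [] then st.1 ++ [""] else st.1) ++ [t], false)

def normB (tokens : List String) : List String :=
  (tokens.foldl bStep ([], false)).1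

def transform_tab2_alt (text : String) : String :=
  PySem.Str.join "\n" (normB (tokenizeB (PySem.Str.splitlines text)))

-- ===== PRECONDITION & SPEC =====
def Spec_transform_tab2 (text : String) (out : String) : Prop := out = transform_tab2_alt text
instance (text : String) (out : String) : Decidable (Spec_transform_tab2 text out) := by unfold Spec_transform_tab2; infer_instance

-- ===== CLAIM (what is proved, stated in full; the proofs are below) =====
def Claim_equal_transform_tab2 : Prop := ∀ (text : String), Dom_transform_tab2 text → Spec_transform_tab2 text (transform_tab2 text)

-- ===== LEMMAS AND PROOFS =====

-- A's online blank-collapsing append, as a fold step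
def pushTok (out : List String) (t : String) : List String :=
  if t = "" then (if out ≠ [] ∧ out.getLast? ≠ some "" then out ++ [""] else out)
  else out ++ [t]

theorem strip_ne_of_marker {l : String} (h : isMarkerP l = true) :
    PySem.Str.strip l ≠ "" := by
  intro he; unfold isMarkerP at h; rw [he] at h; simp at h

theorem rstrip_eq_nil_all_space {cs : List Char} (h : PySem.Chars.rstrip cs = []) :
    ∀ c ∈ cs, PySem.Chars.isspace c := by
  unfold PySem.Chars.rstrip at h
  have h2 : cs.reverse.dropWhile PySem.Chars.isspace = [] := by
    have := congrArg List.reverse h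
    simpa using this
  intro c hc
  exact List.dropWhile_eq_nil_iff.mp h2 c (List.mem_reverse.mpr hc)

theorem rstrip_ne_of_not_blank {l : String} (h : blankB l = false) :
    PySem.Str.rstrip l ≠ "" := by
  unfold blankB at h
  simp at h
  intro he
  apply h
  have hc : PySem.Chars.rstrip l.toList = [] := by
    have := congrArg String.toList he
    simpa using this
  have hall := rstrip_eq_nil_all_space hc
  have hl : PySem.Chars.lstrip l.toList = [] := by
    unfold PySem.Chars.lstrip
    exact List.dropWhile_eq_nil_iff.mpr hall
  have hs : (PySem.Str.strip l).toList = [] := by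
    simp [PySem.Chars.strip, hl, PySem.Chars.rstrip]
  exact String.toList_inj.mp (by simpa using hs)

theorem merge_ne_empty (m d : String) : mergeP m d ≠ "" := by
  intro he
  have := congrArg String.toList he
  simp [mergeP] at this

theorem not_marker_of_blank {l : String} (h : blankB l = true) : isMarkerP l = false := by
  unfold blankB at h; simp at h
  unfold isMarkerP; rw [h]; simp

theorem aInner_spec (lines : List String) (j : Nat) (hj : j ≤ lines.length) :
    lines.drop (aInner lines lines.length j) = (lines.drop j).dropWhile blankB ∧
      aInner lines lines.length j ≤ lines.length := by
  rw [aInner]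
  split
  · rename_i h
    have hd : lines.drop j = lines[j] :: lines.drop (j + 1) := List.drop_eq_getElem_cons h
    have hg : lines.getD j "" = lines[j] := List.getD_eq_getElem lines "" h
    split
    · rename_i hb
      rw [hg] at hb
      have ih := aInner_spec lines (j + 1) (by omega)
      rw [hd, List.dropWhile_cons_of_pos hb]
      exact ih
    · rename_i hb
      rw [hg] at hb
      rw [hd, List.dropWhile_cons_of_neg hb, ← hd]
      exact ⟨rfl, by omega⟩
  · rename_i h
    have hj' : j = lines.length := by omega
    constructor
    · rw [hj']
      simp
    · omega
termination_by lines.length - j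

set_option maxHeartbeats 1000000 in
theorem aLoop_eq (lines : List String) (i : Nat) (out : List String) :
    aLoop lines lines.length i out = (tokenizeB (lines.drop i)).foldl pushTok out := by
  rw [aLoop]
  split
  · rename_i h
    dsimp only
    have hg : lines.getD i "" = lines[i] := List.getD_eq_getElem lines "" h
    have hd : lines.drop i = lines.getD i "" :: lines.drop (i + 1) := by
      rw [hg]; exact List.drop_eq_getElem_cons h
    rw [hd, tokenizeB]
    by_cases hm : isMarkerP (lines.getD i "") = true
    · have hnb : blankB (lines.getD i "") = false := by
        cases hb : blankB (lines.getD i "") with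
        | false => rfl
        | true => rw [not_marker_of_blank hb] at hm; exact absurd hm (by simp)
      rw [if_pos hm]
      rw [if_neg (show ¬ blankB (lines.getD i "") = true by rw [hnb]; simp), if_pos hm]
      have spec := aInner_spec lines (i + 1) (by omega)
      have hge : i + 1 ≤ aInner lines lines.length (i + 1) := aInner_ge lines lines.length (i + 1)
      set j := aInner lines lines.length (i + 1) with hjdef
      cases hdw : (lines.drop (i + 1)).dropWhile blankB with
      | nil =>
        have hjn : lines.length ≤ j := by
          by_contra hc
          have h1 : lines.drop j ≠ [] := by
            simp [List.drop_eq_nil_iff]; omega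
          rw [spec.1, hdw] at h1
          exact h1 rfl
        rw [dif_neg (fun hc => absurd hc.1 (by omega))]
        dsimp only
        rw [aLoop_eq lines (i + 1) (out ++ [PySem.Str.strip (lines.getD i "")])]
        rw [List.foldl_cons]
        congr 1
        rw [pushTok, if_neg (strip_ne_of_marker hm)]
      | cons d rest' =>
        have hj1 : lines.drop j = d :: rest' := by
          rw [spec.1, hdw]
        have hjn : j < lines.length := by
          by_contra hc
          rw [List.drop_eq_nil_of_le (by omega)] at hj1
          exact absurd hj1 (by simp)
        have hdg : lines.getD j "" = d := by
          have h1 : (lines.drop j).head? = some d := by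
            rw [hj1]; rfl
          rw [List.head?_drop] at h1
          rw [List.getD_eq_getElem lines "" hjn]
          exact Option.some_injective _ (by rw [← h1, List.getElem?_eq_getElem hjn])
        have hj2 : lines.drop (j + 1) = rest' := by
          have := congrArg List.tail hj1
          simpa [List.tail_drop] using this
        dsimp only
        by_cases hdm : isMarkerP d = true
        · rw [dif_neg (fun hc => hc.2 (by rw [hdg]; exact hdm))]
          rw [if_neg (by rw [hdm]; simp)]
          rw [aLoop_eq lines (i + 1) (out ++ [PySem.Str.strip (lines.getD i "")])]
          rw [List.foldl_cons]
          congr 1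
          rw [pushTok, if_neg (strip_ne_of_marker hm)]
        · rw [if_pos hdm]
          split
          next hc =>
            rw [hdg]
            rw [List.foldl_cons]
            have hpt : pushTok out (mergeP (lines.getD i "") d) =
                out ++ [mergeP (lines.getD i "") d] := by
              rw [pushTok, if_neg (merge_ne_empty _ _)]
            rw [hpt, ← hj2]
            exact aLoop_eq lines (j + 1) (out ++ [mergeP (lines.getD i "") d])
          next hc => exact absurd ⟨hjn, by rw [hdg]; exact hdm⟩ hc
    · rw [if_neg hm]
      by_cases hb : blankB (lines.getD i "") = true
      · rw [if_pos hb, if_pos hb]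
        rw [aLoop_eq lines (i + 1)
              (if out ≠ [] ∧ out.getLast? ≠ some "" then out ++ [""] else out)]
        rw [List.foldl_cons]
        congr 1
      · rw [if_neg hb, if_neg hb, if_neg hm]
        rw [aLoop_eq lines (i + 1) (out ++ [PySem.Str.rstrip (lines.getD i "")])]
        rw [List.foldl_cons]
        congr 1
        rw [pushTok,
          if_neg (rstrip_ne_of_not_blank (show blankB (lines.getD i "") = false by
            cases hbb : blankB (lines.getD i "") with
            | false => rfl
            | true => exact absurd hbb hb))]
  · rename_i h
    rw [List.drop_eq_nil_of_le (by omega), tokenizeB]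
    rfl
termination_by lines.length - i
decreasing_by
  · omega
  · omega
  · omega
  · omega
  · omega


def goodB (o : List String) : Prop :=
  o = [] ∨ (o.getLast? ≠ some "" ∧ o.head? ≠ some "")

def mixB (o : List String) (p : Bool) : List String :=
  if p ∧ o ≠ [] then o ++ [""] else o

theorem fold_inv (ts : List String) (o : List String) (p : Bool) (hg : goodB o) :
    ts.foldl pushTok (mixB o p) = mixB (ts.foldl bStep (o, p)).1 (ts.foldl bStep (o, p)).2 ∧
      goodB (ts.foldl bStep (o, p)).1 := by
  induction ts generalizing o p with
  | nil => exact ⟨rfl, hg⟩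
  | cons t ts ih =>
    simp only [List.foldl_cons]
    by_cases ht : t = ""
    · subst ht
      have h1 : pushTok (mixB o p) "" = mixB o true := by
        rcases hg with rfl | ⟨hl, hh⟩
        · simp [mixB, pushTok]
        · by_cases ho : o = []
          · subst ho; simp [mixB, pushTok]
          · by_cases hp : p
            · have hlast : (o ++ [""]).getLast? = some ("" : String) := List.getLast?_concat
              simp [pushTok, mixB, hp, ho, hlast]
            · simp [pushTok, mixB, hp, ho, hl]
      have h2 : bStep (o, p) "" = (o, true) := by simp [bStep]
      rw [h1, h2]
      exact ih o true hg
    · have h1 : pushTok (mixB o p) t = (if p ∧ o ≠ [] then o ++ [""] else o) ++ [t] := by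
        simp [pushTok, ht, mixB]
      have h2 : bStep (o, p) t = ((if p ∧ o ≠ [] then o ++ [""] else o) ++ [t], false) := by
        simp [bStep, ht]
      rw [h1, h2]
      have hgood : goodB ((if p ∧ o ≠ [] then o ++ [""] else o) ++ [t]) := by
        refine Or.inr ⟨?_, ?_⟩
        · rw [List.getLast?_concat]
          simp [ht]
        · by_cases ho : o = []
          · subst ho; simp [ht]
          · have hh : o.head? ≠ some "" := by
              rcases hg with rfl | ⟨_, hh⟩
              · simp at ho
              · exact hh
            split
            · rw [List.append_assoc, List.head?_append_of_ne_nil o ho]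
              exact hh
            · rw [List.head?_append_of_ne_nil o ho]
              exact hh
      have := ih ((if p ∧ o ≠ [] then o ++ [""] else o) ++ [t]) false hgood
      simpa [mixB] using this

theorem dropBoth_mix (o : List String) (p : Bool) (hg : goodB o) :
    dropTrailA (dropLeadA (mixB o p)) = o := by
  rcases hg with rfl | ⟨hl, hh⟩
  · simp [mixB, dropLeadA, dropTrailA]
  · by_cases ho : o = []
    · subst ho; simp [mixB, dropLeadA, dropTrailA]
    · obtain ⟨a, r, rfl⟩ : ∃ a r, o = a :: r := by
        cases o with
        | nil => simp at ho
        | cons a r => exact ⟨a, r, rfl⟩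
      have ha : a ≠ "" := by
        intro he; subst he; simp at hh
      have hlead : ∀ x, dropLeadA (a :: x) = a :: x := by
        intro x; rw [dropLeadA]; simp [ha]
      have htrail : dropTrailA (a :: r) = a :: r := by
        rw [dropTrailA]; rw [dif_neg hl]
      by_cases hp : p
      · have hm : mixB (a :: r) p = (a :: r) ++ [""] := by simp [mixB, hp]
        rw [hm]
        rw [show ((a :: r) ++ [""] : List String) = a :: (r ++ [""]) by simp]
        rw [hlead]
        rw [dropTrailA]
        rw [dif_pos (by rw [show (a :: (r ++ [""]) : List String) = (a :: r) ++ [""] by simp]; exact List.getLast?_concat)]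
        rw [show (a :: (r ++ [""]) : List String) = (a :: r) ++ [""] by simp, List.dropLast_concat]
        exact htrail
      · have hm : mixB (a :: r) p = a :: r := by simp [mixB, hp]
        rw [hm, hlead, htrail]

-- ===== VERDICT (by name: the statement is the Claim_ definition above) =====
theorem transform_tab2_spec : Claim_equal_transform_tab2 := by
  intro text _
  unfold Spec_transform_tab2 transform_tab2 transform_tab2_alt
  have h1 := aLoop_eq (PySem.Str.splitlines text) 0 []
  simp only [List.drop_zero] at h1
  rw [h1]
  have h2 := fold_inv (tokenizeB (PySem.Str.splitlines text)) [] false (Or.inl rfl)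
  have h3 : mixB ([] : List String) false = [] := by simp [mixB]
  rw [h3] at h2
  rw [h2.1, dropBoth_mix _ _ h2.2]
  rfl
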